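-- pv_equiv track=rewrite | github.com/hjun-park/Coding-test-self-study | _cop/[FF]leetcode/[주석달기]616. LeetCode (premium).py | func
-- ===== SOURCE A (Python) =====
-- from typing import List
--
-- def func(s: str, _dict: List):
--     visited = [False] * len(s)
--
--     for d in _dict:
--         start_idx = 0
--         while True:
--             idx = s.find(d, start_idx)
--             if idx == -1:
--                 break
--
--             visited[idx:idx+len(d)] = [True] * len(d)
--             start_idx = idx + 1
--
--     rst = ''
--     before = False
--     for i in range(len(visited)):
--         if not before and visited[i]:    #
--             rst += f'<b>{s[i]}'
--             before = visited[i]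
--
--         elif before and not visited[i]:
--             rst += f'</b>{s[i]}'
--             before = visited[i]
--
--         else:
--             rst += s[i]
--             before = visited[i]
--
--     if visited[-1] is True:
--         rst += '</b>'
--
--     return rst
-- ===== SOURCE B (Python) =====
-- def func(s, _dict):
--     n = len(s)
--     # a position j is bold iff it lies inside some occurrence of a dictionary word
--     covered = [
--         any(s[i:i + len(d)] == d
--             for d in _dict
--             for i in range(max(0, j - len(d) + 1), j + 1))
--         for j in range(n)
--     ]
--     parts = []
--     for i in range(n):
--         if covered[i] and (i == 0 or not covered[i - 1]):
--             parts.append('<b>')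
--         parts.append(s[i])
--         if covered[i] and (i == n - 1 or not covered[i + 1]):
--             parts.append('</b>')
--     return ''.join(parts)
-- ===== Notes on version B (the rewrite author's own statement) =====
-- stated objective: alternative
-- what changed: B replaces A's per-word repeated s.find scans that paint a visited array and A's stateful before-flag output loop by a per-position coverage test (does any dictionary word match inside a window around the position) and a stateless per-character builder that inserts <b>/</b> by comparing each position with its neighbours.
-- crash fix: On the empty string s A raises IndexError (visited[-1] on an empty list); B returns the empty string. — e.g. on func("", ["a"]): A raises IndexError, B returns ""
import Mathlib
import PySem

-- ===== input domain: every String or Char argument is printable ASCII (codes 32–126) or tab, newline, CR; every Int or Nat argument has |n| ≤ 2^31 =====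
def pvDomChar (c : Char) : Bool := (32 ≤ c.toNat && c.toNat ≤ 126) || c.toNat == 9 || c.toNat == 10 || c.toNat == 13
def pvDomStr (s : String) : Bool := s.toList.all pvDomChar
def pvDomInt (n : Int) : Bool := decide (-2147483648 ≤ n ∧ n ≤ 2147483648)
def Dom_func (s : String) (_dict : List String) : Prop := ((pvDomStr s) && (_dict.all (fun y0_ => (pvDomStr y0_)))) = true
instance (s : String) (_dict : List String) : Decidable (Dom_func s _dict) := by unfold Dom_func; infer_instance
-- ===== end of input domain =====

-- B replaces A's per-word repeated find-and-paint scans and stateful tag loop by a per-position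
-- coverage test plus a stateless neighbour-comparing builder (objective: alternative, same cost class).

-- ===== PORT A =====
-- Python slice assignment  visited[idx:idx+L] = [True]*L
def markSlice (v : List Bool) (idx L : Nat) : List Bool :=
  v.take idx ++ List.replicate L true ++ v.drop (idx + L)

-- termination facts for the 'while True: idx = s.find(d, start_idx)' loop
theorem pvFindFrom_top (cs d : List Char) (st : Nat) (h : cs.length < st) :
    PySem.Chars.findFrom cs d (st : Int) none = -1 := by
  simp only [PySem.Chars.findFrom]
  have h1 : ¬ ((st : Int) < 0) := by omega
  have h2 : (cs.length : Int) < (st : Int) := by exact_mod_cast h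
  simp [h1, h2]

theorem pvFindFrom_bounds (cs d : List Char) (st : Nat)
    (h : PySem.Chars.findFrom cs d (st : Int) none ≠ -1) :
    st ≤ cs.length ∧ (st : Int) ≤ PySem.Chars.findFrom cs d (st : Int) none ∧
      (PySem.Chars.findFrom cs d (st : Int) none).toNat ≤ cs.length := by
  have hle : st ≤ cs.length := by
    by_contra hgt
    exact h (pvFindFrom_top cs d st (by omega))
  refine ⟨hle, (PySem.Chars.findFrom_natCast_spec cs d st hle h).1, ?_⟩
  have heq := PySem.Chars.findFrom_natCast cs d st hle
  have hfl := PySem.Chars.find_le_length (List.drop st cs) d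
  simp only [List.length_drop] at hfl
  by_cases hf : PySem.Chars.find (List.drop st cs) d = -1
  · rw [heq, if_pos hf] at h; exact absurd rfl h
  · rw [heq, if_neg hf]
    have := PySem.Chars.neg_one_le_find (List.drop st cs) d
    omega

def findLoop (cs d : List Char) (v : List Bool) (st : Nat) : List Bool :=
  let idx := PySem.Chars.findFrom cs d (st : Int) none
  if h : idx = -1 then v
  else findLoop cs d (markSlice v idx.toNat d.length) (idx.toNat + 1)
termination_by cs.length + 1 - st
decreasing_by
  obtain ⟨h1, h2, h3⟩ := pvFindFrom_bounds cs d st h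
  omega

def func (s : String) (_dict : List String) : String :=
  let cs := s.toList
  let visited := _dict.foldl (fun v d => findLoop cs d.toList v 0) (List.replicate cs.length false)
  let rst := (List.range cs.length).foldl (fun (st : List Char × Bool) i =>
      let vi := visited.getD i false
      if !st.2 && vi then (st.1 ++ ('<' :: 'b' :: '>' :: [cs.getD i ' ']), vi)
      else if st.2 && !vi then (st.1 ++ ('<' :: '/' :: 'b' :: '>' :: [cs.getD i ' ']), vi)
      else (st.1 ++ [cs.getD i ' '], vi)) ([], false)
  match PySem.List.pyGet? visited (-1) with
  | some true => String.ofList (rst.1 ++ ('<' :: '/' :: 'b' :: '>' :: []))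
  | _ => String.ofList rst.1

-- ===== PORT B =====
def coveredAt (cs : List Char) (ds : List String) (j : Nat) : Bool :=
  ds.any fun d =>
    (PySem.List.pyRange (max 0 ((j : Int) - d.toList.length + 1)) ((j : Int) + 1)).any fun i =>
      PySem.List.slice cs (some i) (some (i + d.toList.length)) == d.toList

def func_alt (s : String) (_dict : List String) : String :=
  let cs := s.toList
  let n := cs.length
  let covered := (List.range n).map (fun j => coveredAt cs _dict j)
  String.ofList <| (List.range n).foldl (fun acc i =>
    let acc := if covered.getD i false && (decide (i = 0) || !covered.getD (i-1) false)
               then acc ++ ('<' :: 'b' :: '>' :: []) else acc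
    let acc := acc ++ [cs.getD i ' ']
    if covered.getD i false && (decide (i = n-1) || !covered.getD (i+1) false)
    then acc ++ ('<' :: '/' :: 'b' :: '>' :: []) else acc) []

-- ===== PRECONDITION & SPEC =====
-- Pre_ excludes only the empty string, on which A raises IndexError (visited[-1] on the empty list).
def Pre_func (s : String) (_dict : List String) : Prop := s ≠ ""
instance (s : String) (_dict : List String) : Decidable (Pre_func s _dict) := by unfold Pre_func; infer_instance
def pvWitness_func : String × List String := ("abcxyz", ["abc", "xy"])

-- On the empty string s, A raises IndexError (visited[-1] on an empty list); B returns "".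
def Raises_func (s : String) (_dict : List String) : Prop := s = ""
instance (s : String) (_dict : List String) : Decidable (Raises_func s _dict) := by unfold Raises_func; infer_instance
def pvRaiseWitness_func : String × List String := ("", ["a"])
def pvRaiseWitnessOut_func : String := ""

def Spec_func (s : String) (_dict : List String) (out : String) : Prop := out = func_alt s _dict
instance (s : String) (_dict : List String) (out : String) : Decidable (Spec_func s _dict out) := by unfold Spec_func; infer_instance

-- ===== CLAIM (what is proved, stated in full; the proofs are below) =====
def Claim_equal_func : Prop := ∀ (s : String) (_dict : List String), Dom_func s _dict → Pre_func s _dict → Spec_func s _dict (func s _dict)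
def Claim_raises_func : Prop := (∀ (s : String) (_dict : List String), Dom_func s _dict → Raises_func s _dict → ¬ Pre_func s _dict) ∧ (Dom_func (pvRaiseWitness_func.1) (pvRaiseWitness_func.2) ∧ Raises_func (pvRaiseWitness_func.1) (pvRaiseWitness_func.2) ∧ func_alt (pvRaiseWitness_func.1) (pvRaiseWitness_func.2) = pvRaiseWitnessOut_func)

-- ===== LEMMAS AND PROOFS =====

theorem markSlice_getD {v : List Bool} {idx L : Nat} (h : idx + L ≤ v.length) (j : Nat) :
    ((markSlice v idx L).getD j false = true ↔ ((idx ≤ j ∧ j < idx + L) ∨ v.getD j false = true)) := by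
  have hti : (v.take idx).length = idx := by simp; omega
  rcases lt_or_ge j idx with hj | hj
  · rw [markSlice, List.append_assoc, List.getD_append _ _ _ _ (by omega)]
    rw [List.getD_eq_getElem?_getD, List.getD_eq_getElem?_getD, List.getElem?_take_of_lt hj]
    simp; omega
  · rcases lt_or_ge j (idx + L) with hj2 | hj2
    · rw [markSlice, List.append_assoc, List.getD_eq_getElem?_getD,
        List.getElem?_append_right (by omega), List.getElem?_append_left (by rw [hti]; rw [List.length_replicate]; omega)]
      simp [List.getElem?_replicate, hti]
      rw [if_pos (by omega : j - idx < L)]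
      simp [hj, hj2]
    · rw [markSlice, List.append_assoc, List.getD_eq_getElem?_getD,
        List.getElem?_append_right (by omega), List.getElem?_append_right (by rw [hti, List.length_replicate]; omega)]
      rw [List.getElem?_drop]
      rw [hti, List.length_replicate]
      rw [List.getD_eq_getElem?_getD]
      have : idx + L + (j - idx - L) = j := by omega
      rw [this]
      simp
      omega

theorem markSlice_length {v : List Bool} {idx L : Nat} (h : idx + L ≤ v.length) :
    (markSlice v idx L).length = v.length := by
  simp [markSlice]; omega

def OccP (cs d : List Char) (st j : Nat) : Prop :=
  ∃ i : Nat, st ≤ i ∧ i ≤ j ∧ j < i + d.length ∧ d <+: cs.drop i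

theorem occ_lt_length {cs d : List Char} {st j : Nat} (h : OccP cs d st j) : j < cs.length := by
  obtain ⟨i, _, hij, hjl, hpre⟩ := h
  have := hpre.length_le
  simp only [List.length_drop] at this
  omega

theorem pvFindFrom_occ (cs d : List Char) (st : Nat)
    (h : PySem.Chars.findFrom cs d (st : Int) none ≠ -1) :
    d <+: cs.drop (PySem.Chars.findFrom cs d (st : Int) none).toNat ∧
    (PySem.Chars.findFrom cs d (st : Int) none).toNat + d.length ≤ cs.length ∧
    st ≤ (PySem.Chars.findFrom cs d (st : Int) none).toNat ∧
    (∀ i, st ≤ i → i < (PySem.Chars.findFrom cs d (st : Int) none).toNat → ¬ d <+: cs.drop i) := by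
  obtain ⟨h1, h2, h3⟩ := pvFindFrom_bounds cs d st h
  obtain ⟨hs1, hs2, hs3⟩ := PySem.Chars.findFrom_natCast_spec cs d st h1 h
  have hlen := hs2.length_le
  simp only [List.length_drop] at hlen
  exact ⟨hs2, by omega, by omega, hs3⟩

theorem pvFindFrom_none {cs d : List Char} {st j : Nat}
    (h : PySem.Chars.findFrom cs d (st : Int) none = -1) : ¬ OccP cs d st j := by
  rintro ⟨i, hsti, hij, hjl, hpre⟩
  have hjlen : j < cs.length := occ_lt_length ⟨i, hsti, hij, hjl, hpre⟩
  have hstlen : st ≤ cs.length := by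
    by_contra hgt
    omega
  rw [PySem.Chars.findFrom_natCast_eq_neg_one_iff cs d st hstlen] at h
  apply h
  rw [← PySem.Chars.isIn_iff_infix]
  rw [← PySem.Chars.exists_prefix_drop_iff_isIn]
  refine ⟨i - st, ?_⟩
  rw [List.drop_drop]
  have : st + (i - st) = i := by omega
  rw [this]
  exact hpre

theorem findLoop_length {cs d : List Char} {v : List Bool} {st : Nat}
    (hv : v.length = cs.length) : (findLoop cs d v st).length = v.length := by
  fun_induction findLoop cs d v st with
  | case1 => rfl
  | case2 v st idx h ih =>
    obtain ⟨hpre, hle, hst, hmin⟩ := pvFindFrom_occ cs d st h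
    have hm : idx.toNat + d.length ≤ v.length := by omega
    rw [ih (by rw [markSlice_length hm, hv])]
    exact markSlice_length hm

theorem findLoop_getD {cs d : List Char} {v : List Bool} {st : Nat}
    (hv : v.length = cs.length) (j : Nat) :
    ((findLoop cs d v st).getD j false = true ↔ (v.getD j false = true ∨ OccP cs d st j)) := by
  fun_induction findLoop cs d v st with
  | case1 v st idx h =>
    simp only [idx] at h
    simp [pvFindFrom_none h]
  | case2 v st idx h ih =>
    simp only [idx] at h ih ⊢
    obtain ⟨hpre, hle, hst, hmin⟩ := pvFindFrom_occ cs d st h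
    have hm : idx.toNat + d.length ≤ v.length := by simp only [idx]; omega
    rw [ih (by rw [markSlice_length hm, hv])]
    rw [markSlice_getD hm j]
    simp only [idx]
    constructor
    · rintro ((⟨hj1, hj2⟩ | hvj) | ⟨i, hi1, hi2, hi3, hi4⟩)
      · exact Or.inr ⟨_, hst, hj1, hj2, hpre⟩
      · exact Or.inl hvj
      · exact Or.inr ⟨i, by omega, hi2, hi3, hi4⟩
    · rintro (hvj | ⟨i, hi1, hi2, hi3, hi4⟩)
      · exact Or.inl (Or.inr hvj)
      · rcases lt_trichotomy i (PySem.Chars.findFrom cs d (st : Int) none).toNat with hlt | heq | hgt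
        · exact absurd hi4 (hmin i hi1 hlt)
        · exact Or.inl (Or.inl ⟨by omega, by omega⟩)
        · exact Or.inr ⟨i, by omega, hi2, hi3, hi4⟩

def CovP (cs : List Char) (ds : List String) (j : Nat) : Prop :=
  ∃ d ∈ ds, OccP cs d.toList 0 j

theorem visited_foldl_length (cs : List Char) (ds : List String) :
    ∀ v : List Bool, v.length = cs.length →
      (ds.foldl (fun v d => findLoop cs d.toList v 0) v).length = cs.length := by
  induction ds with
  | nil => intro v hv; simpa using hv
  | cons d ds ih =>
    intro v hv
    simp only [List.foldl_cons]
    exact ih _ (by rw [findLoop_length hv, hv])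

theorem visited_foldl_getD (cs : List Char) (ds : List String) (j : Nat) :
    ∀ v : List Bool, v.length = cs.length →
      ((ds.foldl (fun v d => findLoop cs d.toList v 0) v).getD j false = true
        ↔ (v.getD j false = true ∨ ∃ d ∈ ds, OccP cs d.toList 0 j)) := by
  induction ds with
  | nil => intro v hv; simp
  | cons d ds ih =>
    intro v hv
    simp only [List.foldl_cons]
    rw [ih _ (by rw [findLoop_length hv, hv])]
    rw [findLoop_getD hv j]
    simp only [List.mem_cons]
    constructor
    · rintro ((hvj | ho) | ⟨e, he, ho⟩)
      · exact Or.inl hvj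
      · exact Or.inr ⟨d, Or.inl rfl, ho⟩
      · exact Or.inr ⟨e, Or.inr he, ho⟩
    · rintro (hvj | ⟨e, (rfl | he), ho⟩)
      · exact Or.inl (Or.inl hvj)
      · exact Or.inl (Or.inr ho)
      · exact Or.inr ⟨e, he, ho⟩

theorem visited_getD (cs : List Char) (ds : List String) (j : Nat) :
    ((ds.foldl (fun v d => findLoop cs d.toList v 0) (List.replicate cs.length false)).getD j false = true
      ↔ CovP cs ds j) := by
  rw [visited_foldl_getD cs ds j _ (by simp)]
  simp only [CovP]
  constructor
  · rintro (hvj | h)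
    · exfalso
      rcases lt_or_ge j cs.length with hj | hj
      · simp [List.getD_eq_getElem?_getD, hj] at hvj
      · simp [List.getD_eq_getElem?_getD, Nat.not_lt.mpr hj] at hvj
    · exact h
  · exact Or.inr

theorem coveredAt_eq (cs : List Char) (ds : List String) (j : Nat) :
    (coveredAt cs ds j = true ↔ CovP cs ds j) := by
  simp only [coveredAt, CovP, List.any_eq_true]
  refine exists_congr fun d => and_congr_right fun _ => ?_
  constructor
  · rintro ⟨i, hi, hsl⟩
    rw [PySem.List.mem_pyRange_one] at hi
    have h0 : 0 ≤ i := le_trans (le_max_left 0 _) hi.1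
    rw [PySem.List.slice_toNat cs h0 (by omega)] at hsl
    rw [beq_iff_eq] at hsl
    have hL : (i + (d.toList.length : Int)).toNat - i.toNat = d.toList.length := by omega
    rw [hL] at hsl
    refine ⟨i.toNat, by omega, by omega, ?_, ?_⟩
    · have := congrArg List.length hsl
      simp only [List.length_take, List.length_drop] at this
      omega
    · exact hsl ▸ List.take_prefix _ _
  · rintro ⟨i, _, hij, hjl, hpre⟩
    refine ⟨(i : Int), ?_, ?_⟩
    · rw [PySem.List.mem_pyRange_one]
      constructor
      · apply max_le (by omega) (by omega)
      · omega
    · rw [PySem.List.slice_toNat cs (by omega) (by omega)]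
      rw [beq_iff_eq]
      have hL : ((i : Int) + (d.toList.length : Int)).toNat - (i : Int).toNat = d.toList.length := by omega
      rw [hL, Int.toNat_natCast]
      exact ((List.prefix_iff_eq_take).mp hpre).symm

theorem builder (cs : List Char) (v : List Bool) (hv : v.length = cs.length) :
    ∀ k, k ≤ cs.length →
      (((List.range k).foldl (fun (st : List Char × Bool) i =>
          let vi := v.getD i false
          if !st.2 && vi then (st.1 ++ ('<' :: 'b' :: '>' :: [cs.getD i ' ']), vi)
          else if st.2 && !vi then (st.1 ++ ('<' :: '/' :: 'b' :: '>' :: [cs.getD i ' ']), vi)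
          else (st.1 ++ [cs.getD i ' '], vi)) ([], false)).2
        = (decide (k ≠ 0) && v.getD (k-1) false))
      ∧ ((List.range k).foldl (fun acc i =>
          let acc' := if v.getD i false && (decide (i = 0) || !v.getD (i-1) false)
                     then acc ++ ('<' :: 'b' :: '>' :: []) else acc
          let acc'' := acc' ++ [cs.getD i ' ']
          if v.getD i false && (decide (i = cs.length - 1) || !v.getD (i+1) false)
          then acc'' ++ ('<' :: '/' :: 'b' :: '>' :: []) else acc'') []
        = ((List.range k).foldl (fun (st : List Char × Bool) i =>
          let vi := v.getD i false
          if !st.2 && vi then (st.1 ++ ('<' :: 'b' :: '>' :: [cs.getD i ' ']), vi)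
          else if st.2 && !vi then (st.1 ++ ('<' :: '/' :: 'b' :: '>' :: [cs.getD i ' ']), vi)
          else (st.1 ++ [cs.getD i ' '], vi)) ([], false)).1 ++
            (if (decide (k ≠ 0) && v.getD (k-1) false && !v.getD k false)
             then ('<' :: '/' :: 'b' :: '>' :: []) else [])) := by
  intro k
  induction k with
  | zero => intro _; simp
  | succ k ih =>
    intro hk1
    obtain ⟨ih1, ih2⟩ := ih (by omega)
    rw [List.range_succ, List.foldl_append, List.foldl_append, List.foldl_cons, List.foldl_cons,
      List.foldl_nil, List.foldl_nil, ih2]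
    -- out-of-range lookup
    have hoor : v.getD cs.length false = false := by
      simp [List.getD_eq_getElem?_getD, List.getElem?_eq_none_iff.mpr (by omega : v.length ≤ cs.length)]
    -- the lookahead disjunct equals the plain lookahead
    have hlook : (decide (k = cs.length - 1) || !v.getD (k+1) false) = !v.getD (k+1) false := by
      by_cases hkl : k = cs.length - 1
      · have h1 : k + 1 = cs.length := by omega
        rw [h1, hoor]; simp [hkl]
      · simp [hkl]
    rw [hlook, ih1]
    by_cases hk0 : k = 0
    · subst hk0
      simp only [ne_eq, not_true_eq_false, decide_false, Bool.false_and,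
        Bool.not_false]
      cases hvk : v.getD 0 false <;> cases hvk1 : v.getD 1 false <;>
        simp only [List.getD_eq_getElem?_getD] at hvk hvk1 <;>
        simp [hvk1, List.getD_eq_getElem?_getD] <;>
        simp [hvk]
    · have hd : decide (k ≠ 0) = true := by simp [hk0]
      have hd1 : decide (k + 1 ≠ 0) = true := by simp
      rw [hd, hd1]
      simp only [Bool.true_and]
      have hidx : (decide (k = 0) || !v.getD (k-1) false) = !v.getD (k-1) false := by simp [hk0]
      rw [hidx]
      cases hvk : v.getD k false <;> cases hvk1 : v.getD (k-1) false <;> cases hvk2 : v.getD (k+1) false <;>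
        simp only [List.getD_eq_getElem?_getD] at hvk hvk1 hvk2 <;>
        simp [hvk, hvk1, hvk2, List.getD_eq_getElem?_getD, List.append_assoc]

theorem pvGetNeg1 (v : List Bool) (n : Nat) (hn : v.length = n) (h0 : 0 < n) :
    PySem.List.pyGet? v (-1) = some (v.getD (n-1) false) := by
  have h1 : ¬ ((0:Int) ≤ -1) := by omega
  have h2 : -(v.length:Int) ≤ -1 := by omega
  simp only [PySem.List.pyGet?, PySem.List.pyIdx?, if_neg h1, if_pos h2]
  simp only [Option.bind]
  rw [List.getD_eq_getElem v false (by omega : n - 1 < v.length)]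
  rw [List.getElem?_eq_getElem (by simp; omega)]
  congr 1
  congr 1
  omega

-- ===== VERDICT (by name: the statement is the Claim_ definition above) =====
theorem func_spec : Claim_equal_func := by
  intro s ds _ hpre
  unfold Spec_func func func_alt
  have hne : s.toList ≠ [] := by
    intro hh
    apply hpre
    have := congrArg String.ofList hh
    simpa using this
  have hn : 0 < s.toList.length := List.length_pos_iff.mpr hne
  set cs := s.toList with hcs
  set V := ds.foldl (fun v d => findLoop cs d.toList v 0) (List.replicate cs.length false) with hV
  have hVlen : V.length = cs.length := visited_foldl_length cs ds _ (by simp)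
  have hmap : (List.range cs.length).map (fun j => coveredAt cs ds j) = V := by
    apply List.ext_getElem (by simp [hVlen])
    intro j h1 h2
    simp only [List.getElem_map, List.getElem_range]
    rw [Bool.eq_iff_iff]
    rw [coveredAt_eq cs ds j, ← visited_getD cs ds j, ← hV]
    rw [List.getD_eq_getElem V false h2]
  simp only [hmap]
  obtain ⟨hA2, hB⟩ := builder cs V hVlen cs.length le_rfl
  rw [hB]
  rw [pvGetNeg1 V cs.length hVlen hn]
  have hgn : V.getD cs.length false = false := by
    simp [List.getD_eq_getElem?_getD, List.getElem?_eq_none_iff.mpr (by omega : V.length ≤ cs.length)]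
  rw [hgn]
  have hd : decide (cs.length ≠ 0) = true := by simp; omega
  rw [hd]
  cases hv1 : V.getD (cs.length - 1) false
  · rw [if_neg (by decide), List.append_nil]
  · rw [if_pos (by decide)]

@[simp]
theorem func_raises : Claim_raises_func := by
  unfold Claim_raises_func
  exact ⟨fun s _ _ h => by simpa [Pre_func, Raises_func] using h, by decide⟩
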